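-- pv_equiv track=rewrite | github.com/Wiener234/uni | AuD_weekly/04_teileherrsche/max.py | reRandMax
-- ===== SOURCE A (Python) =====
-- def reRandMax(L,i,j):
--     # pre: 0 <= i <= j < len(L)
--     # post: maximale Summe einer rechten Randfolge
--     # der Teilfolge von i bis j (einschließlich i,j)
--     max = 0
--     sum = 0
--     for k in range(j,i-1,-1): # k = j, j-1, ..., i
--         sum += L[k]
--         if (sum > max):
--             max = sum
--     return max
-- ===== SOURCE B (Python) =====
-- def reRandMax(L, i, j):
--     # Forward Kadane-style recurrence: cur = best sum of a subarray ending at k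
--     # (starting at or after i); discard a negative running value instead of
--     # tracking a separate maximum over right-to-left cumulative sums.
--     cur = 0
--     for k in range(i, j + 1):
--         cur = L[k] + (cur if cur > 0 else 0)
--     return cur if cur > 0 else 0
-- ===== Notes on version B (the rewrite author's own statement) =====
-- stated objective: alternative
-- what changed: Replaces the backward pass that accumulates right-to-left cumulative sums while tracking a separate running maximum with a forward Kadane-style recurrence over a single accumulator (cur = L[k] + max(0, cur)) that discards a negative running value, returning max(0, cur).
import Mathlib
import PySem

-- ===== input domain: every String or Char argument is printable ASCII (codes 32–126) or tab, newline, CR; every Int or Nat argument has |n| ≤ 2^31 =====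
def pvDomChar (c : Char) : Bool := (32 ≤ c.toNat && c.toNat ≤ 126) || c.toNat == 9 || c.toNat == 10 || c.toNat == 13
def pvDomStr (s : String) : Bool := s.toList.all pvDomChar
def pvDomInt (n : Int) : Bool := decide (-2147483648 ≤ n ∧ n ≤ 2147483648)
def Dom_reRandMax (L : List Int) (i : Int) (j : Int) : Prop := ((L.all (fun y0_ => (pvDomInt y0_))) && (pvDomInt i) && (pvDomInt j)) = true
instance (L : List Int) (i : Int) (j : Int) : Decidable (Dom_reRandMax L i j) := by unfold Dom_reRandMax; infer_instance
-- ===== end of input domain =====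

-- B replaces A's backward cumulative-sum pass with a forward Kadane-style
-- discard-negative-prefix recurrence over a single accumulator (alternative
-- decomposition, same cost).


-- ===== PORT A =====
-- for k in range(j, i-1, -1): sum += L[k]; if sum > max: max = sum
def reRandMax (L : List Int) (i : Int) (j : Int) : Int :=
  ((PySem.List.pyRange j (i - 1) (-1)).foldl
    (fun (ms : Int × Int) k =>
      (if ms.2 + PySem.List.pyGetD L k 0 > ms.1 then ms.2 + PySem.List.pyGetD L k 0 else ms.1,
       ms.2 + PySem.List.pyGetD L k 0)) (0, 0)).1

-- ===== PORT B =====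
-- for k in range(i, j+1): cur = L[k] + (cur if cur > 0 else 0); return cur if cur > 0 else 0
def reRandMax_alt (L : List Int) (i : Int) (j : Int) : Int :=
  let cur := (PySem.List.pyRange i (j + 1) 1).foldl
    (fun c k => PySem.List.pyGetD L k 0 + (if c > 0 then c else 0)) 0
  if cur > 0 then cur else 0

-- ===== PRECONDITION & SPEC =====
-- Pre_ excludes exactly the inputs where A's L[k] raises IndexError: a nonempty
-- index range containing an index outside [-len(L), len(L)).
def Pre_reRandMax (L : List Int) (i : Int) (j : Int) : Prop :=
  j < i ∨ (-(L.length : Int) ≤ i ∧ j < (L.length : Int))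
instance (L : List Int) (i : Int) (j : Int) : Decidable (Pre_reRandMax L i j) := by
  unfold Pre_reRandMax; infer_instance

def pvWitness_reRandMax : List Int × Int × Int := ([1, -2, 3], 0, 2)

def Spec_reRandMax (L : List Int) (i : Int) (j : Int) (out : Int) : Prop := out = reRandMax_alt L i j
instance (L : List Int) (i : Int) (j : Int) (out : Int) : Decidable (Spec_reRandMax L i j out) := by unfold Spec_reRandMax; infer_instance

-- ===== CLAIM (what is proved, stated in full; the proofs are below) =====
def Claim_equal_reRandMax : Prop := ∀ (L : List Int) (i : Int) (j : Int), Dom_reRandMax L i j → Pre_reRandMax L i j → Spec_reRandMax L i j (reRandMax L i j)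

-- ===== LEMMAS AND PROOFS =====

-- max(0, best sum of a nonempty-or-empty prefix of vs)
def pvBest : List Int → Int
  | [] => 0
  | v :: vs => max 0 (v + pvBest vs)

theorem pvBest_nonneg (vs : List Int) : 0 ≤ pvBest vs := by
  cases vs with
  | nil => simp [pvBest]
  | cons v vs => simp [pvBest]

-- A's loop over an index list ks, reading values g k: running (max, sum) pair
theorem foldA_eq (g : Int → Int) (ks : List Int) : ∀ (m s : Int), s ≤ m →
    (ks.foldl (fun (ms : Int × Int) k =>
      (if ms.2 + g k > ms.1 then ms.2 + g k else ms.1, ms.2 + g k)) (m, s)).1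
      = max m (s + pvBest (ks.map g)) := by
  induction ks with
  | nil => intro m s h; simp [pvBest]; omega
  | cons k ks ih =>
    intro m s h
    have h1 : (if s + g k > m then s + g k else m) = max m (s + g k) := by omega
    simp only [List.foldl_cons]
    rw [h1, ih (max m (s + g k)) (s + g k) (le_max_right _ _)]
    have := pvBest_nonneg (ks.map g)
    simp only [List.map_cons, pvBest]
    omega

-- B's loop over the reversed index list, reading values g k
theorem foldB_eq (g : Int → Int) (ks : List Int) :
    max 0 (ks.reverse.foldl (fun c k => g k + (if c > 0 then c else 0)) 0)
      = pvBest (ks.map g) := by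
  induction ks with
  | nil => simp [pvBest]
  | cons k ks ih =>
    simp only [List.reverse_cons, List.foldl_append, List.foldl_cons, List.foldl_nil]
    set F := ks.reverse.foldl (fun c k => g k + (if c > 0 then c else 0)) 0 with hF
    have h1 : (if F > 0 then F else 0) = max 0 F := by omega
    rw [h1]
    simp only [List.map_cons, pvBest]
    omega

-- ===== VERDICT (by name: the statement is the Claim_ definition above) =====
theorem reRandMax_spec : Claim_equal_reRandMax := by
  intro L i j _ _
  simp only [Spec_reRandMax, reRandMax, reRandMax_alt]
  have hrev : PySem.List.pyRange j (i - 1) (-1) = (PySem.List.pyRange i (j + 1) 1).reverse := by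
    rw [PySem.List.pyRange_neg_one_eq_reverse]
    norm_num
  rw [hrev, foldA_eq (fun k => PySem.List.pyGetD L k 0) _ 0 0 le_rfl]
  have hb := foldB_eq (fun k => PySem.List.pyGetD L k 0) (PySem.List.pyRange i (j + 1) 1).reverse
  rw [List.reverse_reverse] at hb
  have hnn := pvBest_nonneg (((PySem.List.pyRange i (j + 1) 1).reverse).map (fun k => PySem.List.pyGetD L k 0))
  split_ifs <;> omega
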